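-- pv_equiv track=rewrite | github.com/NehaKumari27102004/AI-Lab-File-Python- | BFS.py | bfsDisconnected
-- ===== SOURCE A (Python) =====
-- from collections import deque
--
-- def bfsDisconnected(adj):
--     V, res = len(adj), []
--     visited = [False] * V
--     for i in range(V):
--         if not visited[i]:
--             q = deque([i])
--             visited[i] = True
--             while q:
--                 node = q.popleft()
--                 res.append(node)
--                 for nei in adj[node]:
--                     if not visited[nei]:
--                         visited[nei] = True
--                         q.append(nei)
--     return res
-- ===== SOURCE B (Python) =====
-- def _unvisited_neighbors(adj, visited, node):
--     out = []
--     for nei in adj[node]: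
--         if not visited[nei]:
--             visited[nei] = True
--             out.append(nei)
--     return out
--
-- def bfsDisconnected(adj):
--     V = len(adj)
--     visited = [False] * V
--     res = []
--     for i in range(V):
--         if not visited[i]:
--             visited[i] = True
--             frontier = [i]
--             while frontier:
--                 res += frontier
--                 nxt = []
--                 for node in frontier:
--                     nxt += _unvisited_neighbors(adj, visited, node)
--                 frontier = nxt
--     return res
-- ===== Notes on version B (the rewrite author's own statement) =====
-- stated objective: alternative
-- what changed: Replaces the FIFO deque with level-synchronous BFS: the current frontier list is emitted wholesale, and a helper gathers each node's unvisited neighbors (marking them on the spot) to assemble the next frontier; result and visited state evolve per level, not per dequeued node.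
import Mathlib
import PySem

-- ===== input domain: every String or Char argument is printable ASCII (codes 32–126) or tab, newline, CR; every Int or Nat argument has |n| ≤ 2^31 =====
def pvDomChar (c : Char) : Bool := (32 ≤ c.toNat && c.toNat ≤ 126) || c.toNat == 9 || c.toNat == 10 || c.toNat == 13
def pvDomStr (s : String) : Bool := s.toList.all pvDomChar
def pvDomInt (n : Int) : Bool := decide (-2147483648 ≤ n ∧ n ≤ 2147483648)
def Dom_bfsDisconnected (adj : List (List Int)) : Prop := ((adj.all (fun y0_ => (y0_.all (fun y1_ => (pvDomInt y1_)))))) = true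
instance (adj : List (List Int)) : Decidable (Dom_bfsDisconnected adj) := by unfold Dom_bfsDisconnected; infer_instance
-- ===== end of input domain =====

-- B replaces A's FIFO deque with level-synchronous BFS (frontier lists, per-node neighbor
-- gathering helper); equal return values, no speed claim.

-- Python's negative-index wraparound for visited[nei]/adj[node] (exact for -V ≤ n < V, the only indices Pre_ admits)
def pvWrap (V : Nat) (n : Int) : Nat := (if n < 0 then n + (V : Int) else n).toNat

-- ===== PORT A =====
-- one neighbor of A's inner loop: "if not visited[nei]: mark; q.append(nei)"
-- (the in-range test implicit in getD only makes the function total; under Pre_ the index is in range)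
def pvStep (adj : List (List Int)) (q : List Int × List Bool) (nei : Int) : List Int × List Bool :=
  if q.2.getD (pvWrap adj.length nei) true = false
  then (q.1 ++ [nei], q.2.set (pvWrap adj.length nei) true) else q

-- "for nei in adj[node]: …"
def pvCollect (adj : List (List Int)) (p : List Int × List Bool) (node : Int) : List Int × List Bool :=
  (adj.getD (pvWrap adj.length node) []).foldl (pvStep adj) p

theorem count_false_set : ∀ (v : List Bool) (j : Nat), v.getD j true = false →
    (v.set j true).count false + 1 = v.count false := by
  intro v
  induction v with
  | nil => intro j h; simp [List.getD] at h
  | cons b t ih =>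
    intro j h
    cases j with
    | zero =>
      have hb : b = false := by simpa using h
      subst hb; simp
    | succ k =>
      have := ih k (by simpa using h)
      simp only [List.set_cons_succ, List.count_cons]
      omega

theorem pvStep_measure (adj : List (List Int)) (p : List Int × List Bool) (a : Int) :
    2 * (pvStep adj p a).2.count false + (pvStep adj p a).1.length
      ≤ 2 * p.2.count false + p.1.length := by
  unfold pvStep
  by_cases h : p.2.getD (pvWrap adj.length a) true = false
  · rw [if_pos h]
    have := count_false_set p.2 (pvWrap adj.length a) h
    simp
    omega
  · rw [if_neg h]

theorem pvCollect_measure (adj : List (List Int)) (p : List Int × List Bool) (node : Int) :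
    2 * (pvCollect adj p node).2.count false + (pvCollect adj p node).1.length
      ≤ 2 * p.2.count false + p.1.length := by
  unfold pvCollect
  generalize adj.getD (pvWrap adj.length node) [] = l
  induction l generalizing p with
  | nil => simp
  | cons a t ih =>
    simp only [List.foldl_cons]
    exact le_trans (ih _) (pvStep_measure adj p a)

-- the 'while q' loop: pop the head, append it to res, enqueue its unvisited neighbors
def pvBfsA (adj : List (List Int)) (q : List Int) (visited : List Bool) (res : List Int) :
    List Int × List Bool :=
  match q with
  | [] => (res, visited)
  | node :: qs =>
      let p := pvCollect adj (qs, visited) node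
      pvBfsA adj p.1 p.2 (res ++ [node])
termination_by 2 * visited.count false + q.length
decreasing_by
  have := pvCollect_measure adj (qs, visited) node
  simp at this ⊢
  omega

def bfsDisconnected (adj : List (List Int)) : List Int :=
  ((List.range adj.length).foldl (fun (s : List Int × List Bool) i =>
      if s.2.getD i false = false then pvBfsA adj [(i : Int)] (s.2.set i true) s.1 else s)
    ([], List.replicate adj.length false)).1

-- ===== PORT B =====
-- helper _unvisited_neighbors: walk one adjacency list, cons up the fresh nodes, threading visited
def pvScan (adj : List (List Int)) (visited : List Bool) : List Int → List Int × List Bool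
  | [] => ([], visited)
  | nei :: rest =>
      if visited.getD (pvWrap adj.length nei) true = false then
        let r := pvScan adj (visited.set (pvWrap adj.length nei) true) rest
        (nei :: r.1, r.2)
      else pvScan adj visited rest

-- "for node in frontier: nxt += _unvisited_neighbors(adj, visited, node)"
def pvNext (adj : List (List Int)) (visited : List Bool) : List Int → List Int × List Bool
  | [] => ([], visited)
  | node :: rest =>
      let s := pvScan adj visited (adj.getD (pvWrap adj.length node) [])
      let r := pvNext adj s.2 rest
      (s.1 ++ r.1, r.2)

theorem pvScan_measure (adj : List (List Int)) :
    ∀ (l : List Int) (v : List Bool),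
    2 * (pvScan adj v l).2.count false + (pvScan adj v l).1.length ≤ 2 * v.count false := by
  intro l
  induction l with
  | nil => simp [pvScan]
  | cons nei rest ih =>
    intro v
    rw [pvScan]
    by_cases h : v.getD (pvWrap adj.length nei) true = false
    · rw [if_pos h]
      have h1 := count_false_set v (pvWrap adj.length nei) h
      have h2 := ih (v.set (pvWrap adj.length nei) true)
      simp
      omega
    · rw [if_neg h]; exact ih v

theorem pvNext_measure (adj : List (List Int)) :
    ∀ (cur : List Int) (v : List Bool),
    2 * (pvNext adj v cur).2.count false + (pvNext adj v cur).1.length ≤ 2 * v.count false := by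
  intro cur
  induction cur with
  | nil => simp [pvNext]
  | cons node rest ih =>
    intro v
    rw [pvNext]
    dsimp only
    have h1 := pvScan_measure adj (adj.getD (pvWrap adj.length node) []) v
    have h2 := ih (pvScan adj v (adj.getD (pvWrap adj.length node) [])).2
    simp only [List.length_append]
    omega

-- the 'while frontier' loop: emit the level, recurse on the next frontier, prepending
def pvLevels (adj : List (List Int)) (frontier : List Int) (visited : List Bool) :
    List Int × List Bool :=
  if h : frontier = [] then ([], visited)
  else
    let p := pvNext adj visited frontier
    let r := pvLevels adj p.1 p.2
    (frontier ++ r.1, r.2)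
termination_by 2 * visited.count false + frontier.length
decreasing_by
  have := pvNext_measure adj frontier visited
  have hl : 0 < frontier.length := List.length_pos_iff.mpr h
  omega

-- the outer 'for i in range(V)' as structural recursion over the index list
def pvStarts (adj : List (List Int)) : List Nat → List Bool → List Int
  | [], _ => []
  | i :: rest, visited =>
      if visited.getD i false = false then
        let c := pvLevels adj [(i : Int)] (visited.set i true)
        c.1 ++ pvStarts adj rest c.2
      else pvStarts adj rest visited

def bfsDisconnected_alt (adj : List (List Int)) : List Int :=
  pvStarts adj (List.range adj.length) (List.replicate adj.length false)

-- ===== PRECONDITION & SPEC =====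
-- Pre_ excludes exactly the inputs where A raises IndexError: an entry outside [-V, V).
def Pre_bfsDisconnected (adj : List (List Int)) : Prop :=
  ∀ l ∈ adj, ∀ x ∈ l, -(adj.length : Int) ≤ x ∧ x < (adj.length : Int)
instance (adj : List (List Int)) : Decidable (Pre_bfsDisconnected adj) := by
  unfold Pre_bfsDisconnected; infer_instance
def pvWitness_bfsDisconnected : List (List Int) := [[1], [0, -2]]
def Spec_bfsDisconnected (adj : List (List Int)) (out : List Int) : Prop := out = bfsDisconnected_alt adj
instance (adj : List (List Int)) (out : List Int) : Decidable (Spec_bfsDisconnected adj out) := by unfold Spec_bfsDisconnected; infer_instance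

-- ===== CLAIM =====
def Claim_equal_bfsDisconnected : Prop := ∀ (adj : List (List Int)), Dom_bfsDisconnected adj → Pre_bfsDisconnected adj → Spec_bfsDisconnected adj (bfsDisconnected adj)

-- ===== LEMMAS AND PROOFS =====

theorem pvStep_prefix (adj : List (List Int)) (q : List Int) (v : List Bool) (a : Int) :
    pvStep adj (q, v) a = (q ++ (pvStep adj ([], v) a).1, (pvStep adj ([], v) a).2) := by
  unfold pvStep
  by_cases h : v.getD (pvWrap adj.length a) true = false
  · rw [if_pos h, if_pos h]; simp
  · rw [if_neg h, if_neg h]; simp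

-- the inner fold only appends to the first component
theorem collect_prefix (adj : List (List Int)) (q : List Int) (v : List Bool) (n : Int) :
    pvCollect adj (q, v) n
      = (q ++ (pvCollect adj ([], v) n).1, (pvCollect adj ([], v) n).2) := by
  unfold pvCollect
  generalize adj.getD (pvWrap adj.length n) [] = l
  induction l generalizing q v with
  | nil => simp
  | cons a t ih =>
    simp only [List.foldl_cons]
    rw [pvStep_prefix]
    rcases hs : pvStep adj ([], v) a with ⟨q1, v1⟩
    simp only
    rw [ih, ih q1 v1]
    simp

-- A's per-neighbor fold computes B's per-node scan
theorem scan_eq_foldl_step (adj : List (List Int)) :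
    ∀ (l : List Int) (v : List Bool) (q : List Int),
    l.foldl (pvStep adj) (q, v) = (q ++ (pvScan adj v l).1, (pvScan adj v l).2) := by
  intro l
  induction l with
  | nil => intro v q; simp [pvScan]
  | cons nei rest ih =>
    intro v q
    simp only [List.foldl_cons]
    by_cases h : v.getD (pvWrap adj.length nei) true = false
    · rw [pvScan, if_pos h]
      have hs : pvStep adj (q, v) nei = (q ++ [nei], v.set (pvWrap adj.length nei) true) := by
        unfold pvStep; rw [if_pos h]
      rw [hs, ih]
      dsimp only
      simp
    · rw [pvScan, if_neg h]
      have hs : pvStep adj (q, v) nei = (q, v) := by unfold pvStep; rw [if_neg h]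
      rw [hs]
      exact ih v q

-- A's per-level fold of pvCollect computes B's pvNext
theorem next_eq_foldl_collect (adj : List (List Int)) :
    ∀ (cur : List Int) (v : List Bool) (q : List Int),
    cur.foldl (pvCollect adj) (q, v) = (q ++ (pvNext adj v cur).1, (pvNext adj v cur).2) := by
  intro cur
  induction cur with
  | nil => intro v q; simp [pvNext]
  | cons node rest ih =>
    intro v q
    simp only [List.foldl_cons]
    rw [pvNext]
    have hc : pvCollect adj (q, v) node
        = (q ++ (pvScan adj v (adj.getD (pvWrap adj.length node) [])).1,
           (pvScan adj v (adj.getD (pvWrap adj.length node) [])).2) := by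
      unfold pvCollect
      exact scan_eq_foldl_step adj _ v q
    rw [hc, ih]
    simp

-- unrolling |cur| pops of A's queue performs exactly one level step
theorem bfsA_level (adj : List (List Int)) :
    ∀ (cur nxt : List Int) (v : List Bool) (res : List Int),
    pvBfsA adj (cur ++ nxt) v res
      = pvBfsA adj (cur.foldl (pvCollect adj) (nxt, v)).1
          (cur.foldl (pvCollect adj) (nxt, v)).2 (res ++ cur) := by
  intro cur
  induction cur with
  | nil => simp
  | cons node cs ih =>
    intro nxt v res
    rw [List.cons_append, pvBfsA]
    simp only [List.foldl_cons]
    rw [collect_prefix adj (cs ++ nxt) v node, collect_prefix adj nxt v node]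
    rcases h : pvCollect adj ([], v) node with ⟨new, v'⟩
    simp only
    rw [List.append_assoc, ih (nxt ++ new) v' (res ++ [node])]
    simp

-- A's queue loop equals B's level loop
theorem bfsA_eq_levels (adj : List (List Int)) :
    ∀ (n : Nat) (q : List Int) (v : List Bool) (res : List Int),
    2 * v.count false + q.length ≤ n →
    pvBfsA adj q v res = (res ++ (pvLevels adj q v).1, (pvLevels adj q v).2) := by
  intro n
  induction n with
  | zero =>
    intro q v res h
    have hq : q = [] := by
      cases q with
      | nil => rfl
      | cons a t => simp at h
    subst hq
    simp [pvBfsA, pvLevels]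
  | succ m ih =>
    intro q v res h
    by_cases hq : q = []
    · subst hq; simp [pvBfsA, pvLevels]
    · rw [pvLevels]
      simp only [hq, dite_false]
      have hL := bfsA_level adj q [] v res
      rw [List.append_nil] at hL
      rw [hL, next_eq_foldl_collect adj q v []]
      simp only [List.nil_append]
      rw [ih]
      · simp
      · have := pvNext_measure adj q v
        have hl : 0 < q.length := List.length_pos_iff.mpr hq
        omega

-- the visited list after B processes a prefix of start indices (proof-only helper)
def pvVisAfter (adj : List (List Int)) : List Nat → List Bool → List Bool
  | [], v => v
  | i :: rest, v =>
      if v.getD i false = false then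
        pvVisAfter adj rest (pvLevels adj [(i : Int)] (v.set i true)).2
      else pvVisAfter adj rest v

-- A's outer fold computes B's pvStarts (with pvVisAfter tracking the visited list)
theorem outer_fold_eq (adj : List (List Int)) :
    ∀ (is : List Nat) (res : List Int) (v : List Bool),
    is.foldl (fun (s : List Int × List Bool) i =>
        if s.2.getD i false = false then pvBfsA adj [(i : Int)] (s.2.set i true) s.1 else s)
      (res, v)
      = (res ++ pvStarts adj is v, pvVisAfter adj is v) := by
  intro is
  induction is with
  | nil => intro res v; simp [pvStarts, pvVisAfter]
  | cons i rest ih =>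
    intro res v
    simp only [List.foldl_cons]
    rw [pvStarts, pvVisAfter]
    by_cases h : v.getD i false = false
    · rw [if_pos h, if_pos h, if_pos h]
      rw [bfsA_eq_levels adj (2 * (v.set i true).count false + 1) [(i : Int)]
            (v.set i true) res (by simp)]
      rw [ih]
      simp
    · rw [if_neg h, if_neg h, if_neg h]
      exact ih res v

-- ===== VERDICT =====
theorem bfsDisconnected_spec : Claim_equal_bfsDisconnected := by
  intro adj _ _
  unfold Spec_bfsDisconnected bfsDisconnected bfsDisconnected_alt
  rw [outer_fold_eq adj (List.range adj.length) [] (List.replicate adj.length false)]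
  simp
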